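-- pv_equiv track=rewrite | github.com/pypi-data/pypi-mirror-379 | packages/general-validator/general_validator-1.7.0-py3-none-any.whl/general_validator/engine.py | _split_logical_expression
-- ===== SOURCE A (Python) =====
-- def _split_logical_expression(expression, operator):
--     """安全分割逻辑表达式，正确处理引号内容"""
--     parts = []
--     current_part = ""
--     in_quotes = False
--     quote_char = None
--     i = 0
--
--     while i < len(expression):
--         char = expression[i]
--
--         # 处理引号
--         if char in ('"', "'") and (i == 0 or expression[i-1] != '\\'):
--             if not in_quotes:
--                 in_quotes = True
--                 quote_char = char
--             elif char == quote_char: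
--                 in_quotes = False
--                 quote_char = None
--
--         # 检查操作符
--         if not in_quotes and i <= len(expression) - len(operator):
--             if expression[i:i+len(operator)] == operator:
--                 # 找到操作符
--                 parts.append(current_part)
--                 current_part = ""
--                 i += len(operator)
--                 continue
--
--         current_part += char
--         i += 1
--
--     # 添加最后一部分
--     parts.append(current_part)
--     return parts
-- ===== SOURCE B (Python) =====
-- def _split_logical_expression(expression, operator):
--     """Recursive decomposition: find the next unquoted operator occurrence from a
--     start index (fresh quote state, escape check uses the global index), then
--     slice the original string between boundaries instead of accumulating chars."""
--     n = len(expression)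
--     m = len(operator)
--
--     def find_next(start):
--         in_quotes = False
--         quote_char = None
--         i = start
--         while i < n:
--             ch = expression[i]
--             if ch in ('"', "'") and (i == 0 or expression[i - 1] != '\\'):
--                 if not in_quotes:
--                     in_quotes = True
--                     quote_char = ch
--                 elif ch == quote_char:
--                     in_quotes = False
--                     quote_char = None
--             if not in_quotes and i <= n - m and expression[i:i + m] == operator:
--                 return i
--             i += 1
--         return None
--
--     parts = []
--     start = 0
--     while True:
--         pos = find_next(start)
--         if pos is None:
--             parts.append(expression[start:])
--             return parts
--         parts.append(expression[start:pos])
--         start = pos + m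
-- ===== Notes on version B (the rewrite author's own statement) =====
-- stated objective: faster
-- what changed: A accumulates current_part character by character in one stateful loop; B instead repeatedly calls a find_next helper that scans for the next unquoted operator occurrence and slices the original string between successive boundaries, so parts are built by one slice each instead of per-character string concatenation.
-- outside the precondition, e.g. on _split_logical_expression('', ''): A returns [''], B returns ['']; on _split_logical_expression("'abc", ''): A returns ["'abc"], B returns ["'abc"]
import Mathlib
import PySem

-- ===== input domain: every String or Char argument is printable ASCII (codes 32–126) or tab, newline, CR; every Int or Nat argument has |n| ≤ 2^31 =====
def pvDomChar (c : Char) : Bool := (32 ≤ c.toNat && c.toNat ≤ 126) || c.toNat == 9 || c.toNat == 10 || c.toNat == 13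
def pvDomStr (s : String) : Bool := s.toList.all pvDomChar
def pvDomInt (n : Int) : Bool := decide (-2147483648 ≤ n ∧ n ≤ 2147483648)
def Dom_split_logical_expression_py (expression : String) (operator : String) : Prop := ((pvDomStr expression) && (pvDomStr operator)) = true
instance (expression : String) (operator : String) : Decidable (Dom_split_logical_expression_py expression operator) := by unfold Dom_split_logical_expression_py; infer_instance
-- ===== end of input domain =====

-- B replaces A's per-character accumulating scan by a find-next-boundary helper plus one
-- slice per part (objective: faster — a timing run measured B faster on large inputs).

-- ===== PORT A =====

-- quote-toggling step, written verbatim and identically in both Pythons (shared helper here)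
def pvQuoteStep (expr : List Char) (i : Nat) (inq : Bool) (qc : Option Char) :
    Bool × Option Char :=
  let ch := expr.getD i ' '
  if (ch = '"' ∨ ch = '\'') ∧ (i = 0 ∨ expr.getD (i - 1) ' ' ≠ '\\') then
    if inq = false then (true, some ch)
    else if some ch = qc then (false, none)
    else (inq, qc)
  else (inq, qc)

-- `not in_quotes and i <= len(e) - len(op) and e[i:i+len(op)] == op` (i ≤ n - m as i + m ≤ n)
def pvOpMatch (expr op : List Char) (i : Nat) (inq : Bool) : Bool :=
  decide (inq = false ∧ i + op.length ≤ expr.length ∧ (expr.drop i).take op.length = op)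

-- A's while-loop: accumulates parts and current_part char by char; fuel = one unit per
-- iteration (enough whenever the operator is nonempty; the empty operator makes the
-- Python loop diverge and is outside Pre_).
def pvGoA (expr op : List Char) : Nat → Nat → Bool → Option Char → List String → List Char → List String
  | 0, _, _, _, parts, cur => parts ++ [String.ofList cur]
  | f + 1, i, inq, qc, parts, cur =>
    if i < expr.length then
      let st := pvQuoteStep expr i inq qc
      if pvOpMatch expr op i st.1 then
        pvGoA expr op f (i + op.length) st.1 st.2 (parts ++ [String.ofList cur]) []
      else
        pvGoA expr op f (i + 1) st.1 st.2 parts (cur ++ [expr.getD i ' '])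
    else parts ++ [String.ofList cur]

def split_logical_expression_py (expression : String) (operator : String) : List String :=
  pvGoA expression.toList operator.toList (expression.toList.length + 1) 0 false none [] []

-- ===== PORT B =====

-- Source B's find_next: scan from `start` with fresh quote state, return first split index
def pvFindNext (expr op : List Char) : Nat → Nat → Bool → Option Char → Option Nat
  | 0, _, _, _ => none
  | f + 1, i, inq, qc =>
    if i < expr.length then
      let st := pvQuoteStep expr i inq qc
      if pvOpMatch expr op i st.1 then some i
      else pvFindNext expr op f (i + 1) st.1 st.2
    else none

-- Source B's outer loop: slice the expression between successive boundaries; fuel = one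
-- unit per produced part.
def pvGoB (expr op : List Char) : Nat → Nat → List String
  | 0, start => [String.ofList (expr.drop start)]
  | f + 1, start =>
    match pvFindNext expr op (expr.length - start) start false none with
    | none => [String.ofList (expr.drop start)]
    | some p => String.ofList ((expr.drop start).take (p - start)) :: pvGoB expr op f (p + op.length)

def split_logical_expression_py_alt (expression : String) (operator : String) : List String :=
  pvGoB expression.toList operator.toList (expression.toList.length + 1) 0

-- ===== PRECONDITION & SPEC =====
-- Pre_ excludes the empty operator: there A's loop makes no progress and diverges on every
-- expression with a reachable unquoted position; on the rare such inputs where A does return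
-- (empty or fully quoted expressions) B returns the same value, but nothing is claimed.
def Pre_split_logical_expression_py (expression : String) (operator : String) : Prop :=
  operator ≠ ""
instance (expression : String) (operator : String) : Decidable (Pre_split_logical_expression_py expression operator) := by unfold Pre_split_logical_expression_py; infer_instance

def pvWitness_split_logical_expression_py : String × String := ("'a and b' and c", " and ")

def Spec_split_logical_expression_py (expression : String) (operator : String) (out : List String) : Prop := out = split_logical_expression_py_alt expression operator
instance (expression : String) (operator : String) (out : List String) : Decidable (Spec_split_logical_expression_py expression operator out) := by unfold Spec_split_logical_expression_py; infer_instance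

-- ===== CLAIM (what is proved, stated in full; the proofs are below) =====
def Claim_equal_split_logical_expression_py : Prop := ∀ (expression : String) (operator : String), Dom_split_logical_expression_py expression operator → Pre_split_logical_expression_py expression operator → Spec_split_logical_expression_py expression operator (split_logical_expression_py expression operator)

-- ===== LEMMAS AND PROOFS =====

-- the not-in-quotes state always carries quote_char = None, and pvQuoteStep preserves that
theorem pvQuoteStep_inv (expr : List Char) (i : Nat) (inq : Bool) (qc : Option Char)
    (hq : inq = false → qc = none) :
    (pvQuoteStep expr i inq qc).1 = false → (pvQuoteStep expr i inq qc).2 = none := by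
  unfold pvQuoteStep
  cases inq <;> simp_all <;> split_ifs <;> simp_all

theorem pvDropTake (expr : List Char) (i k : Nat) (hi : i < expr.length) :
    (expr.drop i).take (k + 1) = expr.getD i ' ' :: (expr.drop (i + 1)).take k := by
  rw [List.drop_eq_getElem_cons hi, List.getD_eq_getElem expr ' ' hi, List.take_succ_cons]

-- a successful find is at or after the start index and inside the string
theorem pvFindNext_bounds (expr op : List Char) :
    ∀ (f i : Nat) (inq : Bool) (qc : Option Char) (p : Nat),
      pvFindNext expr op f i inq qc = some p → i ≤ p ∧ p < expr.length := by
  intro f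
  induction f with
  | zero => intro i inq qc p h; simp [pvFindNext] at h
  | succ f ih =>
    intro i inq qc p h
    unfold pvFindNext at h
    by_cases hi : i < expr.length
    · simp only [hi, if_true] at h
      by_cases hm : pvOpMatch expr op i (pvQuoteStep expr i inq qc).1 = true
      · simp [hm] at h; omega
      · simp only [hm, Bool.false_eq_true, if_false] at h
        have := ih (i + 1) (pvQuoteStep expr i inq qc).1 (pvQuoteStep expr i inq qc).2 p h
        omega
    · simp [hi] at h

-- pvFindNext does not depend on the fuel once it covers the remaining length
theorem pvFindNext_fuel (expr op : List Char) :
    ∀ (f f' i : Nat) (inq : Bool) (qc : Option Char),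
      expr.length - i ≤ f → expr.length - i ≤ f' →
      pvFindNext expr op f i inq qc = pvFindNext expr op f' i inq qc := by
  intro f
  induction f with
  | zero =>
    intro f' i inq qc hf hf'
    have hi : ¬ i < expr.length := by omega
    cases f' with
    | zero => rfl
    | succ f' => simp [pvFindNext, hi]
  | succ f ih =>
    intro f' i inq qc hf hf'
    by_cases hi : i < expr.length
    · cases f' with
      | zero => omega
      | succ f' =>
        unfold pvFindNext
        simp only [hi, if_true]
        by_cases hm : pvOpMatch expr op i (pvQuoteStep expr i inq qc).1 = true
        · simp [hm]
        · simp only [hm, Bool.false_eq_true, if_false]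
          exact ih f' (i + 1) _ _ (by omega) (by omega)
    · cases f' <;> simp [pvFindNext, hi]

-- pvGoA only appends to `parts`
theorem pvGoA_parts (expr op : List Char) :
    ∀ (f i : Nat) (inq : Bool) (qc : Option Char) (parts : List String) (cur : List Char),
      pvGoA expr op f i inq qc parts cur = parts ++ pvGoA expr op f i inq qc [] cur := by
  intro f
  induction f with
  | zero => intro i inq qc parts cur; simp [pvGoA]
  | succ f ih =>
    intro i inq qc parts cur
    unfold pvGoA
    by_cases hi : i < expr.length
    · simp only [hi, if_true]
      by_cases hm : pvOpMatch expr op i (pvQuoteStep expr i inq qc).1 = true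
      · simp only [hm, if_true]
        rw [ih _ _ _ (parts ++ [String.ofList cur]), ih _ _ _ ([] ++ [String.ofList cur])]
        simp
      · simp only [hm, Bool.false_eq_true, if_false]
        exact ih _ _ _ parts _
    · simp [hi]

-- A's loop described through B's boundary finder (same fuel on both sides; the
-- `take f` covers fuel exhaustion uniformly)
theorem pvGoA_eq_find (expr op : List Char) :
    ∀ (f i : Nat) (inq : Bool) (qc : Option Char) (parts : List String) (cur : List Char),
      (inq = false → qc = none) →
      pvGoA expr op f i inq qc parts cur =
        match pvFindNext expr op f i inq qc with
        | none => parts ++ [String.ofList (cur ++ (expr.drop i).take f)]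
        | some p => pvGoA expr op (f - (p - i) - 1) (p + op.length) false none
            (parts ++ [String.ofList (cur ++ (expr.drop i).take (p - i))]) [] := by
  intro f
  induction f with
  | zero => intro i inq qc parts cur _; simp [pvGoA, pvFindNext]
  | succ f ih =>
    intro i inq qc parts cur hq
    by_cases hi : i < expr.length
    · by_cases hm : pvOpMatch expr op i (pvQuoteStep expr i inq qc).1 = true
      · -- a split fires at i
        have h1 : (pvQuoteStep expr i inq qc).1 = false := by
          have := of_decide_eq_true hm; exact this.1
        have h2 : (pvQuoteStep expr i inq qc).2 = none := pvQuoteStep_inv expr i inq qc hq h1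
        conv_lhs => unfold pvGoA
        conv_rhs => unfold pvFindNext
        simp only [hi, if_true, hm]
        simp [h1, h2]
      · -- no split at i: one ordinary character step
        have hq' : (pvQuoteStep expr i inq qc).1 = false → (pvQuoteStep expr i inq qc).2 = none :=
          pvQuoteStep_inv expr i inq qc hq
        conv_lhs => unfold pvGoA
        conv_rhs => unfold pvFindNext
        simp only [hi, if_true, hm, Bool.false_eq_true, if_false]
        rw [ih (i + 1) _ _ parts (cur ++ [expr.getD i ' ']) hq']
        cases hfn : pvFindNext expr op f (i + 1) (pvQuoteStep expr i inq qc).1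
          (pvQuoteStep expr i inq qc).2 with
        | none =>
          simp only []
          rw [pvDropTake expr i f hi]
          simp
        | some p =>
          have hb := pvFindNext_bounds expr op f (i + 1) _ _ p hfn
          simp only []
          have e1 : f - (p - (i + 1)) - 1 = f + 1 - (p - i) - 1 := by omega
          have e2 : p - i = (p - (i + 1)) + 1 := by omega
          rw [e1, e2, pvDropTake expr i (p - (i + 1)) hi]
          simp
    · -- i past the end: loop exits
      conv_lhs => unfold pvGoA
      conv_rhs => unfold pvFindNext
      simp only [hi, if_false]
      rw [List.drop_eq_nil_of_le (by omega)]
      simp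

-- main correspondence: A's scan from a fresh state equals B's slice-between-boundaries loop
theorem pvMain (expr op : List Char) (hop : 1 ≤ op.length) :
    ∀ (f' f start : Nat), expr.length - start ≤ f → expr.length - start < f' →
      pvGoA expr op f start false none [] [] = pvGoB expr op f' start := by
  intro f'
  induction f' with
  | zero => intro f start hf hf'; omega
  | succ f' ih =>
    intro f start hf hf'
    rw [pvGoA_eq_find expr op f start false none [] [] (by intro; rfl)]
    rw [pvFindNext_fuel expr op f (expr.length - start) start false none hf (le_refl _)]
    conv_rhs => unfold pvGoB
    cases hfn : pvFindNext expr op (expr.length - start) start false none with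
    | none =>
      simp only []
      rw [List.take_of_length_le (by simp; omega)]
      simp
    | some p =>
      have hb := pvFindNext_bounds expr op _ start _ _ p hfn
      simp only []
      rw [pvGoA_parts]
      rw [ih (f - (p - start) - 1) (p + op.length) (by omega) (by omega)]
      simp

theorem pvToList_ne_nil (s : String) (h : s ≠ "") : s.toList ≠ [] := by
  intro hc
  exact h (String.toList_eq_nil_iff.mp hc)

-- ===== VERDICT (by name: the statement is the Claim_ definition above) =====
theorem split_logical_expression_py_spec : Claim_equal_split_logical_expression_py := by
  intro expression operator _ hpre
  unfold Spec_split_logical_expression_py split_logical_expression_py split_logical_expression_py_alt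
  have hop : 1 ≤ operator.toList.length :=
    List.length_pos_of_ne_nil (pvToList_ne_nil operator hpre)
  exact pvMain expression.toList operator.toList hop
    (expression.toList.length + 1) (expression.toList.length + 1) 0 (by omega) (by omega)
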